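-- pv_equiv track=rewrite | github.com/Crenovent/ai-crenovent | dsl/registry/dependency_graph.py | _bfs_max_depth
-- ===== SOURCE A (Python) =====
-- from typing import Dict, List, Optional, Any, Set, Tuple
--
-- def _bfs_max_depth(start_node: str, adj_list: Dict[str, List[str]]) -> int:
--     """BFS to find maximum depth from a node"""
--
--     from collections import deque
--
--     queue = deque([(start_node, 0)])
--     visited = set()
--     max_depth = 0
--
--     while queue:
--         node, depth = queue.popleft()
--
--         if node in visited:
--             continue
--
--         visited.add(node)
--         max_depth = max(max_depth, depth)
--
--         for neighbor in adj_list.get(node, []):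
--             if neighbor not in visited:
--                 queue.append((neighbor, depth + 1))
--
--     return max_depth
-- ===== SOURCE B (Python) =====
-- def _bfs_max_depth(start_node: str, adj_list) -> int:
--     """Level-synchronous BFS: count non-empty levels instead of tagging queue entries with depths."""
--     visited = {start_node}
--     frontier = [start_node]
--     depth = 0
--     while True:
--         next_frontier = []
--         for node in frontier:
--             for nb in adj_list.get(node, []):
--                 if nb not in visited:
--                     visited.add(nb)
--                     next_frontier.append(nb)
--         if not next_frontier:
--             return depth
--         depth += 1
--         frontier = next_frontier
-- ===== Notes on version B (the rewrite author's own statement) =====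
-- stated objective: alternative
-- what changed: Replaces the depth-tagged single queue with dedup-at-pop by a level-synchronous BFS: a frontier list per level, marking nodes visited at discovery (so no duplicate queue entries), returning the count of non-empty levels.
import Mathlib
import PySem

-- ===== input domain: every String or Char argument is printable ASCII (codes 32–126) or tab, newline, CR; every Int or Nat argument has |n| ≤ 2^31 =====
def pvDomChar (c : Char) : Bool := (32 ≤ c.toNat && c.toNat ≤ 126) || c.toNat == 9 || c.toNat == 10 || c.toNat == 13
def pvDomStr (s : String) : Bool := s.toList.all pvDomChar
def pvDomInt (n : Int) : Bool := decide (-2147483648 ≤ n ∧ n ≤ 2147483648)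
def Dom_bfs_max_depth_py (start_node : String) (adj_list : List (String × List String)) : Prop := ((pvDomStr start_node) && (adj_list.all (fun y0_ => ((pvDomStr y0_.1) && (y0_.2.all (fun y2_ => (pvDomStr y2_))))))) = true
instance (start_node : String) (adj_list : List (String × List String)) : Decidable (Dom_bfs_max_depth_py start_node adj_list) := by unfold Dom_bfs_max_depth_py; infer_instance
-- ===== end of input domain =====

-- B replaces A's depth-tagged queue (dedup at pop) by a level-synchronous BFS (frontier per level,
-- dedup at discovery), returning the number of non-empty levels; alternative decomposition, same cost class.
-- Both Pythons mutate nothing observable; equivalence is about the return value.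

-- ===== PORT A =====
-- shared helper: adj_list.get(node, [])
def pvNbrs (adj : List (String × List String)) (n : String) : List String :=
  PySem.Dict.getD (PySem.Dict.mk adj) n []

-- universe of nodes mentioned by adj (keys and values); termination measure only
def pvU (adj : List (String × List String)) : List String :=
  adj.flatMap (fun p => p.1 :: p.2)

-- termination-measure lemmas (cited by the decreasing_by blocks of the two loop ports below)
theorem pvNbrs_length_le (adj : List (String × List String)) (n : String) :
    (pvNbrs adj n).length ≤ (adj.map (fun p => p.2.length)).sum := by
  unfold pvNbrs PySem.Dict.getD PySem.Dict.get?
  cases hf : List.find? (fun p => p.1 == n) (PySem.Dict.mk adj).items with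
  | none => simp
  | some pr =>
    simp only [Option.map_some, Option.getD_some]
    have hm : pr ∈ adj := List.mem_of_find?_eq_some hf
    exact List.single_le_sum (fun x _ => Nat.zero_le x) _
      (List.mem_map_of_mem hm)

theorem pvNbrs_ne_nil_mem_U (adj : List (String × List String)) (n : String)
    (h : pvNbrs adj n ≠ []) : n ∈ pvU adj := by
  unfold pvNbrs PySem.Dict.getD PySem.Dict.get? at h
  cases hf : List.find? (fun p => p.1 == n) (PySem.Dict.mk adj).items with
  | none => simp [hf] at h
  | some pr =>
    have heq : pr.1 = n := by
      have := List.find?_some hf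
      simpa using this
    have hm : pr ∈ adj := List.mem_of_find?_eq_some hf
    exact List.mem_flatMap.mpr ⟨pr, hm, by simp [heq]⟩

theorem pvNbrs_mem_values (adj : List (String × List String)) (n x : String)
    (h : x ∈ pvNbrs adj n) : x ∈ adj.flatMap (fun p => p.2) := by
  unfold pvNbrs PySem.Dict.getD PySem.Dict.get? at h
  cases hf : List.find? (fun p => p.1 == n) (PySem.Dict.mk adj).items with
  | none => simp [hf] at h
  | some pr =>
    simp only [hf, Option.map_some, Option.getD_some] at h
    exact List.mem_flatMap.mpr ⟨pr, List.mem_of_find?_eq_some hf, h⟩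

theorem pvFilterLen_le (W : List String) (s t : PySem.Set String)
    (hsub : ∀ x, x ∈ s → x ∈ t) :
    (W.filter (fun x => !t.contains x)).length ≤ (W.filter (fun x => !s.contains x)).length := by
  have hsub' : ∀ x, s.contains x = true → t.contains x = true := fun x hx =>
    (PySem.Set.contains_iff t x).mpr (hsub x ((PySem.Set.contains_iff s x).mp hx))
  induction W with
  | nil => simp
  | cons w W ih =>
    cases hct : t.contains w with
    | false =>
      have hcs : s.contains w = false := by
        cases hcs : s.contains w with
        | false => rfl
        | true => rw [hsub' w hcs] at hct; cases hct
      simp only [List.filter_cons, hct, hcs, Bool.not_false]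
      exact Nat.succ_le_succ ih
    | true =>
      cases hcs : s.contains w with
      | false =>
        simp only [List.filter_cons, hct, hcs, Bool.not_false, Bool.not_true,
          Bool.false_eq_true]
        exact Nat.le_succ_of_le ih
      | true =>
        simp only [List.filter_cons, hct, hcs, Bool.not_true, Bool.false_eq_true]
        exact ih

theorem pvFilterLen_lt (W : List String) (s t : PySem.Set String)
    (hsub : ∀ x, x ∈ s → x ∈ t) (n : String) (hnW : n ∈ W) (hns : n ∉ s) (hnt : n ∈ t) :
    (W.filter (fun x => !t.contains x)).length < (W.filter (fun x => !s.contains x)).length := by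
  induction W with
  | nil => cases hnW
  | cons w W ih =>
    cases hct : t.contains w with
    | false =>
      have hwn : n ≠ w := by
        intro he
        rw [← he, (PySem.Set.contains_iff t n).mpr hnt] at hct; cases hct
      have hcs : s.contains w = false := by
        cases hcs : s.contains w with
        | false => rfl
        | true =>
          have : t.contains w = true :=
            (PySem.Set.contains_iff t w).mpr (hsub w ((PySem.Set.contains_iff s w).mp hcs))
          rw [this] at hct; cases hct
      have hnW' : n ∈ W := by
        cases List.mem_cons.mp hnW with
        | inl h => exact absurd h hwn
        | inr h => exact h
      simp only [List.filter_cons, hct, hcs, Bool.not_false]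
      exact Nat.succ_lt_succ (ih hnW')
    | true =>
      cases hcs : s.contains w with
      | false =>
        simp only [List.filter_cons, hct, hcs, Bool.not_false, Bool.not_true,
          Bool.false_eq_true]
        exact Nat.lt_succ_of_le (pvFilterLen_le W s t hsub)
      | true =>
        have hwn : n ≠ w := fun he => hns (he ▸ (PySem.Set.contains_iff s w).mp hcs)
        have hnW' : n ∈ W := by
          cases List.mem_cons.mp hnW with
          | inl h => exact absurd h hwn
          | inr h => exact h
        simp only [List.filter_cons, hct, hcs, Bool.not_true, Bool.false_eq_true]
        exact ih hnW'

-- while queue: pop (node, depth); skip if visited; else mark, bump max, enqueue unvisited neighbors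
def pvBfsA (adj : List (String × List String)) (queue : List (String × Int))
    (visited : PySem.Set String) (max_depth : Int) : Int :=
  match queue with
  | [] => max_depth
  | (node, depth) :: rest =>
    if visited.contains node then
      pvBfsA adj rest visited max_depth
    else
      let visited' := visited.add node
      let queue' := (pvNbrs adj node).foldl
        (fun q neighbor => if !visited'.contains neighbor then q ++ [(neighbor, depth + 1)] else q) rest
      pvBfsA adj queue' visited' (max max_depth depth)
termination_by
  ((pvU adj).filter (fun x => !visited.contains x)).length * ((adj.map (fun p => p.2.length)).sum + 1)
    + queue.length
decreasing_by
  · simp only [List.length_cons]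
    omega
  · rename_i hvis
    simp only [dite_eq_ite, PySem.List.foldl_append_if, List.length_cons,
      List.length_append, List.length_map]
    by_cases hU : node ∈ pvU adj
    · have h1 : ((pvU adj).filter (fun x => !(visited.add node).contains x)).length
          < ((pvU adj).filter (fun x => !visited.contains x)).length := by
        refine pvFilterLen_lt _ _ _ (fun x hx => ?_) node hU ?_ ?_
        · exact (PySem.Set.mem_add visited node x).mpr (Or.inl hx)
        · intro hmem; exact absurd ((PySem.Set.contains_iff visited node).mpr hmem) hvis
        · exact (PySem.Set.mem_add visited node node).mpr (Or.inr rfl)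
      have h2 : ((pvNbrs adj node).filter
          (fun nb => !(visited.add node).contains nb)).length
          ≤ (adj.map (fun p => p.2.length)).sum := by
        have := pvNbrs_length_le adj node
        have := List.length_filter_le (fun nb => !(visited.add node).contains nb) (pvNbrs adj node)
        omega
      set a := ((pvU adj).filter (fun x => !visited.contains x)).length
      set a' := ((pvU adj).filter (fun x => !(visited.add node).contains x)).length
      set T := (adj.map (fun p => p.2.length)).sum
      set L := ((pvNbrs adj node).filter
          (fun nb => !(visited.add node).contains nb)).length
      calc a' * (T + 1) + (rest.length + L) ≤ a' * (T + 1) + rest.length + T := by omega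
        _ < a * (T + 1) + (rest.length + 1) := by nlinarith
    · have hnil : pvNbrs adj node = [] := by
        by_contra hne; exact hU (pvNbrs_ne_nil_mem_U adj node hne)
      have h1 := pvFilterLen_le (pvU adj) visited (visited.add node)
        (fun x hx => (PySem.Set.mem_add visited node x).mpr (Or.inl hx))
      simp only [hnil, List.filter_nil, List.length_nil]
      have : ((pvU adj).filter (fun x => !(visited.add node).contains x)).length
          * ((adj.map (fun p => p.2.length)).sum + 1)
          ≤ ((pvU adj).filter (fun x => !visited.contains x)).length
          * ((adj.map (fun p => p.2.length)).sum + 1) := by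
        exact Nat.mul_le_mul_right _ h1
      omega

def bfs_max_depth_py (start_node : String) (adj_list : List (String × List String)) : Int :=
  pvBfsA adj_list [(start_node, 0)] PySem.Set.empty 0

-- ===== PORT B =====
-- one level: collect unvisited neighbors of the frontier, marking them visited at discovery
def pvBfsBInner (adj : List (String × List String)) (frontier : List String)
    (visited : PySem.Set String) : PySem.Set String × List String :=
  frontier.foldl (fun st node =>
    (pvNbrs adj node).foldl (fun st2 nb =>
      if !st2.1.contains nb then (st2.1.add nb, st2.2 ++ [nb]) else st2) st) (visited, [])

-- inner fold over one node's neighbor list (cited by pvBfsBInner_spec below)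
theorem pvStepFold (nbrs : List String) :
    ∀ (st : PySem.Set String × List String),
    (∀ x, x ∈ (nbrs.foldl (fun st2 nb =>
        if !st2.1.contains nb then (st2.1.add nb, st2.2 ++ [nb]) else st2) st).1 ↔
        x ∈ st.1 ∨ x ∈ nbrs) ∧
    (∀ x, x ∈ (nbrs.foldl (fun st2 nb =>
        if !st2.1.contains nb then (st2.1.add nb, st2.2 ++ [nb]) else st2) st).2 ↔
        x ∈ st.2 ∨ (x ∈ nbrs ∧ x ∉ st.1)) := by
  induction nbrs with
  | nil => intro st; simp
  | cons nb rest ih =>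
    intro st
    simp only [List.foldl_cons]
    cases hc : st.1.contains nb with
    | true =>
      have hnb : nb ∈ st.1 := (PySem.Set.contains_iff st.1 nb).mp hc
      rw [if_neg (by simp)]
      simp only [List.mem_cons]
      obtain ⟨ih1, ih2⟩ := ih st
      refine ⟨fun x => ?_, fun x => ?_⟩
      · rw [ih1]
        constructor
        · rintro (h | h)
          · exact Or.inl h
          · exact Or.inr (Or.inr h)
        · rintro (h | h | h)
          · exact Or.inl h
          · exact Or.inl (h ▸ hnb)
          · exact Or.inr h
      · rw [ih2]
        constructor
        · rintro (h | ⟨h1, h2⟩)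
          · exact Or.inl h
          · exact Or.inr ⟨Or.inr h1, h2⟩
        · rintro (h | ⟨h1 | h1, h2⟩)
          · exact Or.inl h
          · exact absurd (h1 ▸ hnb) h2
          · exact Or.inr ⟨h1, h2⟩
    | false =>
      have hnb : nb ∉ st.1 := fun hm => by
        rw [(PySem.Set.contains_iff st.1 nb).mpr hm] at hc; cases hc
      rw [if_pos (by simp)]
      simp only [List.mem_cons]
      obtain ⟨ih1, ih2⟩ := ih (st.1.add nb, st.2 ++ [nb])
      refine ⟨fun x => ?_, fun x => ?_⟩
      · rw [ih1]
        simp only [PySem.Set.mem_add]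
        tauto
      · rw [ih2]
        simp only [List.mem_append, List.mem_singleton, PySem.Set.mem_add]
        constructor
        · rintro ((h | h) | ⟨h1, h2⟩)
          · exact Or.inl h
          · exact Or.inr ⟨Or.inl h, h ▸ hnb⟩
          · exact Or.inr ⟨Or.inr h1, fun hx => h2 (Or.inl hx)⟩
        · rintro (h | ⟨h1 | h1, h2⟩)
          · exact Or.inl (Or.inl h)
          · exact Or.inl (Or.inr h1)
          · by_cases hx : x = nb
            · exact Or.inl (Or.inr hx)
            · exact Or.inr ⟨h1, fun hc' => (hc'.elim h2 hx)⟩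

-- all levels' fold, generalized over the initial state
theorem pvLevelFold (adj : List (String × List String)) (frontier : List String) :
    ∀ (st : PySem.Set String × List String),
    (∀ x, x ∈ (frontier.foldl (fun st node =>
        (pvNbrs adj node).foldl (fun st2 nb =>
          if !st2.1.contains nb then (st2.1.add nb, st2.2 ++ [nb]) else st2) st) st).1 ↔
        x ∈ st.1 ∨ ∃ n ∈ frontier, x ∈ pvNbrs adj n) ∧
    (∀ x, x ∈ (frontier.foldl (fun st node =>
        (pvNbrs adj node).foldl (fun st2 nb =>
          if !st2.1.contains nb then (st2.1.add nb, st2.2 ++ [nb]) else st2) st) st).2 ↔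
        x ∈ st.2 ∨ ((∃ n ∈ frontier, x ∈ pvNbrs adj n) ∧ x ∉ st.1)) := by
  induction frontier with
  | nil => intro st; simp
  | cons n0 rest ih =>
    intro st
    simp only [List.foldl_cons]
    obtain ⟨s1, s2⟩ := pvStepFold (pvNbrs adj n0) st
    obtain ⟨ih1, ih2⟩ := ih ((pvNbrs adj n0).foldl (fun st2 nb =>
      if !st2.1.contains nb then (st2.1.add nb, st2.2 ++ [nb]) else st2) st)
    refine ⟨fun x => ?_, fun x => ?_⟩
    · rw [ih1, s1 x]
      simp only [List.exists_mem_cons_iff]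
      tauto
    · rw [ih2, s2 x, s1 x]
      simp only [List.exists_mem_cons_iff]
      tauto

-- characterization of one level (cited by pvBfsB's decreasing_by and by the equivalence proofs)
theorem pvBfsBInner_spec (adj : List (String × List String)) (frontier : List String)
    (visited : PySem.Set String) :
    (∀ x, x ∈ (pvBfsBInner adj frontier visited).1 ↔
        x ∈ visited ∨ ∃ n ∈ frontier, x ∈ pvNbrs adj n) ∧
    (∀ x, x ∈ (pvBfsBInner adj frontier visited).2 ↔
        (∃ n ∈ frontier, x ∈ pvNbrs adj n) ∧ x ∉ visited) := by
  obtain ⟨h1, h2⟩ := pvLevelFold adj frontier (visited, ([] : List String))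
  unfold pvBfsBInner
  exact ⟨fun x => by rw [h1 x], fun x => by rw [h2 x]; simp⟩

-- while True: build next level; stop when it is empty, else descend with depth+1
def pvBfsB (adj : List (String × List String)) (frontier : List String)
    (visited : PySem.Set String) (depth : Int) : Int :=
  let r := pvBfsBInner adj frontier visited
  if r.2 = [] then depth
  else pvBfsB adj r.2 r.1 (depth + 1)
termination_by ((pvU adj).filter (fun x => !visited.contains x)).length
decreasing_by
  rename_i hne
  obtain ⟨x, hx⟩ := List.exists_mem_of_ne_nil _ hne
  have hspec := pvBfsBInner_spec adj frontier visited
  have hx2 := (hspec.2 x).mp hx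
  obtain ⟨⟨n, _, hxn⟩, hxv⟩ := hx2
  refine pvFilterLen_lt _ _ _ (fun y hy => (hspec.1 y).mpr (Or.inl hy)) x ?_ hxv
    ((hspec.1 x).mpr (Or.inr ⟨n, ‹_›, hxn⟩))
  have := pvNbrs_mem_values adj n x hxn
  simp only [pvU, List.mem_flatMap] at *
  obtain ⟨p, hp, hxp⟩ := this
  exact ⟨p, hp, List.mem_cons_of_mem _ hxp⟩

def bfs_max_depth_py_alt (start_node : String) (adj_list : List (String × List String)) : Int :=
  pvBfsB adj_list [start_node] (PySem.Set.add PySem.Set.empty start_node) 0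

-- ===== PRECONDITION & SPEC =====
def Spec_bfs_max_depth_py (start_node : String) (adj_list : List (String × List String)) (out : Int) : Prop := out = bfs_max_depth_py_alt start_node adj_list
instance (start_node : String) (adj_list : List (String × List String)) (out : Int) : Decidable (Spec_bfs_max_depth_py start_node adj_list out) := by unfold Spec_bfs_max_depth_py; infer_instance

-- ===== CLAIM (what is proved, stated in full; the proofs are below) =====
def Claim_equal_bfs_max_depth_py : Prop := ∀ (start_node : String) (adj_list : List (String × List String)), Dom_bfs_max_depth_py start_node adj_list → Spec_bfs_max_depth_py start_node adj_list (bfs_max_depth_py start_node adj_list)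

-- ===== LEMMAS AND PROOFS =====

-- unfolding equations for pvBfsA
theorem pvBfsA_nil (adj : List (String × List String)) (v : PySem.Set String) (m : Int) :
    pvBfsA adj [] v m = m := by
  rw [pvBfsA]

theorem pvBfsA_cons_visited (adj : List (String × List String)) (node : String) (depth : Int)
    (rest : List (String × Int)) (v : PySem.Set String) (m : Int) (h : v.contains node = true) :
    pvBfsA adj ((node, depth) :: rest) v m = pvBfsA adj rest v m := by
  rw [pvBfsA, if_pos h]

theorem pvBfsA_cons_new (adj : List (String × List String)) (node : String) (depth : Int)
    (rest : List (String × Int)) (v : PySem.Set String) (m : Int) (h : v.contains node = false) :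
    pvBfsA adj ((node, depth) :: rest) v m
      = pvBfsA adj (rest ++ ((pvNbrs adj node).filter
          (fun nb => !(v.add node).contains nb)).map (fun nb => (nb, depth + 1)))
          (v.add node) (max m depth) := by
  rw [pvBfsA]; simp only [h, Bool.false_eq_true, if_false, PySem.List.foldl_append_if]

-- A's processing of one level, abstracted: fold over the pending level-d nodes
def pvProcA (adj : List (String × List String)) (visited : PySem.Set String) :
    List String → PySem.Set String × List String
  | [] => (visited, [])
  | n :: rest =>
    if visited.contains n then pvProcA adj visited rest
    else
      let v := visited.add n
      let r := pvProcA adj v rest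
      (r.1, (pvNbrs adj n).filter (fun x => !v.contains x) ++ r.2)

-- LemmaA: running A on a level-d block followed by raw level-(d+1) entries
theorem pvBfsA_level (adj : List (String × List String)) :
    ∀ (pending nextRaw : List String) (visited : PySem.Set String) (m d : Int),
    pvBfsA adj (pending.map (fun n => (n, d)) ++ nextRaw.map (fun n => (n, d + 1))) visited m
      = pvBfsA adj ((nextRaw ++ (pvProcA adj visited pending).2).map (fun n => (n, d + 1)))
          (pvProcA adj visited pending).1
          (if pending.any (fun n => !visited.contains n) then max m d else m) := by
  intro pending
  induction pending with
  | nil =>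
    intro nextRaw visited m d
    simp [pvProcA]
  | cons n rest ih =>
    intro nextRaw visited m d
    simp only [List.map_cons, List.cons_append]
    cases hc : visited.contains n with
    | true =>
      rw [pvBfsA_cons_visited _ _ _ _ _ _ hc, ih]
      have hp : pvProcA adj visited (n :: rest) = pvProcA adj visited rest := by
        simp only [pvProcA]; rw [if_pos hc]
      rw [hp]
      simp only [List.any_cons, hc, Bool.not_true, Bool.false_or]
    | false =>
      rw [pvBfsA_cons_new _ _ _ _ _ _ hc]
      rw [List.append_assoc, ← List.map_append, ih]
      have hp : pvProcA adj visited (n :: rest)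
          = ((pvProcA adj (visited.add n) rest).1,
             (pvNbrs adj n).filter (fun x => !(visited.add n).contains x)
               ++ (pvProcA adj (visited.add n) rest).2) := by
        simp only [pvProcA]; rw [if_neg (by rw [hc]; simp)]
      rw [hp]
      simp only [List.append_assoc]
      congr 1
      have hany : (n :: rest).any (fun x => !visited.contains x) = true := by
        simp only [List.any_cons, hc, Bool.not_false, Bool.true_or]
      rw [if_pos hany]
      split
      · rw [max_assoc, max_self]
      · rfl

theorem pvProcA_fst (adj : List (String × List String)) :
    ∀ (pending : List String) (visited : PySem.Set String) (x : String),
    x ∈ (pvProcA adj visited pending).1 ↔ x ∈ visited ∨ x ∈ pending := by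
  intro pending
  induction pending with
  | nil => intro visited x; simp [pvProcA]
  | cons n rest ih =>
    intro visited x
    simp only [pvProcA]
    cases hc : visited.contains n with
    | true =>
      rw [if_pos rfl]
      have hn : n ∈ visited := (PySem.Set.contains_iff visited n).mp hc
      rw [ih]
      simp only [List.mem_cons]
      constructor
      · rintro (h | h)
        · exact Or.inl h
        · exact Or.inr (Or.inr h)
      · rintro (h | h | h)
        · exact Or.inl h
        · exact Or.inl (h ▸ hn)
        · exact Or.inr h
    | false =>
      rw [if_neg Bool.false_ne_true]
      rw [ih]
      simp only [PySem.Set.mem_add, List.mem_cons]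
      tauto

theorem pvProcA_snd_sub (adj : List (String × List String)) :
    ∀ (pending : List String) (visited : PySem.Set String) (x : String),
    x ∈ (pvProcA adj visited pending).2 →
      ∃ n ∈ pending, n ∉ visited ∧ x ∈ pvNbrs adj n := by
  intro pending
  induction pending with
  | nil => intro visited x h; simp [pvProcA] at h
  | cons n rest ih =>
    intro visited x h
    simp only [pvProcA] at h
    cases hc : visited.contains n with
    | true =>
      rw [if_pos hc] at h
      obtain ⟨nn, hnn, hv, hx⟩ := ih visited x h
      exact ⟨nn, List.mem_cons_of_mem _ hnn, hv, hx⟩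
    | false =>
      rw [if_neg (by rw [hc]; simp)] at h
      have hnv : n ∉ visited := fun hm => by
        rw [(PySem.Set.contains_iff visited n).mpr hm] at hc; cases hc
      rcases List.mem_append.mp h with hl | hr
      · exact ⟨n, List.mem_cons_self, hnv, List.mem_of_mem_filter hl⟩
      · obtain ⟨nn, hnn, hv, hx⟩ := ih (visited.add n) x hr
        have : nn ∉ visited := fun hm => hv ((PySem.Set.mem_add visited n nn).mpr (Or.inl hm))
        exact ⟨nn, List.mem_cons_of_mem _ hnn, this, hx⟩

theorem pvProcA_snd_mem (adj : List (String × List String)) :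
    ∀ (pending : List String) (visited : PySem.Set String) (x n : String),
    n ∈ pending → n ∉ visited → x ∈ pvNbrs adj n →
      x ∉ (pvProcA adj visited pending).1 → x ∈ (pvProcA adj visited pending).2 := by
  intro pending
  induction pending with
  | nil => intro visited x n h; cases h
  | cons h rest ih =>
    intro visited x n hn hnv hxn hxf
    simp only [pvProcA] at hxf ⊢
    cases hc : visited.contains h with
    | true =>
      rw [if_pos hc] at hxf
      rw [if_pos rfl]
      have hne : n ≠ h := fun he =>
        hnv (he ▸ (PySem.Set.contains_iff visited h).mp hc)
      have hnr : n ∈ rest := by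
        cases List.mem_cons.mp hn with
        | inl h' => exact absurd h' hne
        | inr h' => exact h'
      exact ih visited x n hnr hnv hxn hxf
    | false =>
      rw [if_neg (by rw [hc]; simp)] at hxf
      rw [if_neg Bool.false_ne_true]
      by_cases hnh : n = h
      · subst hnh
        by_cases hx2 : x ∈ visited.add n
        · exact absurd ((pvProcA_fst adj rest (visited.add n) x).mpr (Or.inl hx2)) hxf
        · refine List.mem_append.mpr (Or.inl (List.mem_filter.mpr ⟨hxn, ?_⟩))
          cases hcx : (visited.add n).contains x with
          | false => rfl
          | true => exact absurd ((PySem.Set.contains_iff _ x).mp hcx) hx2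
      · have hnr : n ∈ rest := by
          cases List.mem_cons.mp hn with
          | inl h' => exact absurd h' hnh
          | inr h' => exact h'
        have hnv' : n ∉ visited.add h := fun hm => by
          rcases (PySem.Set.mem_add visited h n).mp hm with h' | h'
          · exact hnv h'
          · exact hnh h'
        exact List.mem_append.mpr (Or.inr (ih (visited.add h) x n hnr hnv' hxn hxf))

-- unfolding equation for pvBfsB
theorem pvBfsB_eq (adj : List (String × List String)) (frontier : List String)
    (visited : PySem.Set String) (depth : Int) :
    pvBfsB adj frontier visited depth
      = if (pvBfsBInner adj frontier visited).2 = [] then depth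
        else pvBfsB adj (pvBfsBInner adj frontier visited).2
          (pvBfsBInner adj frontier visited).1 (depth + 1) := by
  rw [pvBfsB]

-- MAIN simulation: A at a level boundary equals B
theorem pvMain (adj : List (String × List String)) (W : List String)
    (hW : ∀ p ∈ adj, ∀ v ∈ p.2, v ∈ W) :
    ∀ (k : Nat) (R F : List String) (visA visB : PySem.Set String) (m d : Int),
    ((W.filter (fun x => !visA.contains x)).length ≤ k) →
    (∀ x, (x ∈ R ∧ x ∉ visA) ↔ x ∈ F) →
    (∀ x, x ∈ visB ↔ x ∈ visA ∨ x ∈ R) →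
    F ≠ [] →
    (∀ x ∈ F, x ∈ W) →
    m ≤ d →
    pvBfsA adj (R.map (fun n => (n, d))) visA m = pvBfsB adj F visB d := by
  intro k
  induction k with
  | zero =>
    intro R F visA visB m d hk h1 h2 hF hFW hmd
    obtain ⟨n, hn⟩ := List.exists_mem_of_ne_nil F hF
    obtain ⟨hnR, hnA⟩ := (h1 n).mpr hn
    have hmem : n ∈ W.filter (fun x => !visA.contains x) := by
      refine List.mem_filter.mpr ⟨hFW n hn, ?_⟩
      cases hcc : visA.contains n with
      | false => rfl
      | true => exact absurd ((PySem.Set.contains_iff visA n).mp hcc) hnA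
    have := List.length_pos_of_mem hmem
    omega
  | succ k ih =>
    intro R F visA visB m d hk h1 h2 hF hFW hmd
    have hlev := pvBfsA_level adj R [] visA m d
    simp only [List.map_nil, List.append_nil, List.nil_append] at hlev
    obtain ⟨n0, hn0F⟩ := List.exists_mem_of_ne_nil F hF
    obtain ⟨hn0R, hn0A⟩ := (h1 n0).mpr hn0F
    have hany : R.any (fun n => !visA.contains n) = true := by
      refine List.any_eq_true.mpr ⟨n0, hn0R, ?_⟩
      cases hcc : visA.contains n0 with
      | false => rfl
      | true => exact absurd ((PySem.Set.contains_iff visA n0).mp hcc) hn0A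
    rw [if_pos hany] at hlev
    have hmax : max m d = d := max_eq_right hmd
    have hspec := pvBfsBInner_spec adj F visB
    have fA1 : ∀ x, x ∈ (pvProcA adj visA R).1 ↔ x ∈ visA ∨ x ∈ R :=
      fun x => pvProcA_fst adj R visA x
    have hAB : ∀ x, x ∈ (pvProcA adj visA R).1 ↔ x ∈ visB := by
      intro x; rw [fA1 x]; exact (h2 x).symm
    have key : ∀ x, (x ∈ (pvProcA adj visA R).2 ∧ x ∉ (pvProcA adj visA R).1)
        ↔ x ∈ (pvBfsBInner adj F visB).2 := by
      intro x
      constructor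
      · rintro ⟨hxN, hxA⟩
        obtain ⟨n, hnR, hnA, hxn⟩ := pvProcA_snd_sub adj R visA x hxN
        exact (hspec.2 x).mpr ⟨⟨n, (h1 n).mp ⟨hnR, hnA⟩, hxn⟩,
          fun hxB => hxA ((hAB x).mpr hxB)⟩
      · intro hx
        obtain ⟨⟨n, hnF, hxn⟩, hxB⟩ := (hspec.2 x).mp hx
        obtain ⟨hnR, hnA⟩ := (h1 n).mpr hnF
        have hxA : x ∉ (pvProcA adj visA R).1 := fun h => hxB ((hAB x).mp h)
        exact ⟨pvProcA_snd_mem adj R visA x n hnR hnA hxn hxA, hxA⟩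
    rw [pvBfsB_eq]
    by_cases hemp : (pvBfsBInner adj F visB).2 = []
    · rw [if_pos hemp, hlev, hmax]
      have hall : ∀ x ∈ (pvProcA adj visA R).2, x ∈ (pvProcA adj visA R).1 := by
        intro x hx
        by_contra hxx
        have := (key x).mp ⟨hx, hxx⟩
        rw [hemp] at this
        cases this
      have hlev2 := pvBfsA_level adj (pvProcA adj visA R).2 [] (pvProcA adj visA R).1 d (d + 1)
      simp only [List.map_nil, List.append_nil, List.nil_append] at hlev2
      have hany2 : ¬ ((pvProcA adj visA R).2.any
          (fun n => !(pvProcA adj visA R).1.contains n) = true) := by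
        intro hh
        obtain ⟨x, hx, hxc⟩ := List.any_eq_true.mp hh
        have := hall x hx
        rw [(PySem.Set.contains_iff _ x).mpr this] at hxc
        cases hxc
      rw [if_neg hany2] at hlev2
      have hsnd : (pvProcA adj (pvProcA adj visA R).1 (pvProcA adj visA R).2).2 = [] := by
        refine List.eq_nil_iff_forall_not_mem.mpr (fun x hx => ?_)
        obtain ⟨n, hnN, hnA, _⟩ := pvProcA_snd_sub adj (pvProcA adj visA R).2
          (pvProcA adj visA R).1 x hx
        exact hnA (hall n hnN)
      rw [hsnd] at hlev2
      simp only [List.map_nil] at hlev2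
      rw [hlev2, pvBfsA_nil]
    · rw [if_neg hemp, hlev, hmax]
      refine ih (pvProcA adj visA R).2 (pvBfsBInner adj F visB).2 (pvProcA adj visA R).1
        (pvBfsBInner adj F visB).1 d (d + 1) ?_ key ?_ hemp ?_ (by omega)
      · have hlt := pvFilterLen_lt W visA (pvProcA adj visA R).1
          (fun x hx => (fA1 x).mpr (Or.inl hx)) n0 (hFW n0 hn0F) hn0A
          ((fA1 n0).mpr (Or.inr hn0R))
        omega
      · intro x
        rw [hspec.1 x]
        constructor
        · rintro (h | hNF)
          · exact Or.inl ((hAB x).mpr h)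
          · by_cases hxA : x ∈ (pvProcA adj visA R).1
            · exact Or.inl hxA
            · obtain ⟨n, hnF, hxn⟩ := hNF
              obtain ⟨hnR, hnA⟩ := (h1 n).mpr hnF
              exact Or.inr (pvProcA_snd_mem adj R visA x n hnR hnA hxn hxA)
        · rintro (h | h)
          · exact Or.inl ((hAB x).mp h)
          · obtain ⟨n, hnR, hnA, hxn⟩ := pvProcA_snd_sub adj R visA x h
            exact Or.inr ⟨n, (h1 n).mp ⟨hnR, hnA⟩, hxn⟩
      · intro x hx
        obtain ⟨⟨n, _, hxn⟩, _⟩ := (hspec.2 x).mp hx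
        obtain ⟨p, hp, hxp⟩ := List.mem_flatMap.mp (pvNbrs_mem_values adj n x hxn)
        exact hW p hp x hxp

-- ===== VERDICT (by name: the statement is the Claim_ definition above) =====
theorem bfs_max_depth_py_spec : Claim_equal_bfs_max_depth_py := by
  intro start_node adj_list _
  unfold Spec_bfs_max_depth_py bfs_max_depth_py bfs_max_depth_py_alt
  have hA : ([(start_node, 0)] : List (String × Int))
      = [start_node].map (fun n => (n, (0 : Int))) := rfl
  rw [hA]
  refine pvMain adj_list (start_node :: adj_list.flatMap (fun p => p.2)) ?_
    ((start_node :: adj_list.flatMap (fun p => p.2)).filter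
      (fun x => !PySem.Set.contains PySem.Set.empty x)).length
    [start_node] [start_node] PySem.Set.empty (PySem.Set.add PySem.Set.empty start_node)
    0 0 le_rfl ?_ ?_ (by simp) ?_ le_rfl
  · intro p hp v hv
    exact List.mem_cons_of_mem _ (List.mem_flatMap.mpr ⟨p, hp, hv⟩)
  · intro x
    simp [PySem.Set.empty]
  · intro x
    simp [PySem.Set.empty, PySem.Set.add, PySem.Set.contains]
  · intro x hx
    simp only [List.mem_singleton] at hx
    simp [hx]
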